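-- pv_equiv track=rewrite | github.com/StBinge/leetcode | 3025.人员站位的方案数-i.py | numberOfPairs
-- ===== SOURCE A (Python) =====
-- from typing import List
--
-- def numberOfPairs(points: List[List[int]]) -> int:
--     points.sort(key=lambda x: [x[0], -x[1]])
--     ret = 0
--     L = len(points)
--     for i in range(L):
--         y1 = points[i][1]
--         ma = float("-inf")
--         for j in range(i + 1, L):
--             y2 = points[j][1]
--             if ma < y2 <= y1:
--                 ret += 1
--                 ma = y2
--     return ret
-- ===== SOURCE B (Python) =====
-- from typing import List
--
-- def numberOfPairs(points: List[List[int]]) -> int: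
--     # Same in-place sort as the original (argument mutation preserved).
--     points.sort(key=lambda x: [x[0], -x[1]])
--     n = len(points)
--     count = 0
--     for i in range(n):
--         for j in range(i + 1, n):
--             if points[j][1] <= points[i][1] and all(
--                 not (points[j][1] <= points[k][1] <= points[i][1])
--                 for k in range(i + 1, j)
--             ):
--                 count += 1
--     return count
-- ===== Notes on version B (the rewrite author's own statement) =====
-- stated objective: alternative
-- what changed: Replaced the single forward pass with a running-max accumulator by a repeated-scan brute force: after the same in-place sort, every ordered index pair (i,j) is tested independently by scanning all intermediate indices for a blocking point, so no loop-carried state remains.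
import Mathlib
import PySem

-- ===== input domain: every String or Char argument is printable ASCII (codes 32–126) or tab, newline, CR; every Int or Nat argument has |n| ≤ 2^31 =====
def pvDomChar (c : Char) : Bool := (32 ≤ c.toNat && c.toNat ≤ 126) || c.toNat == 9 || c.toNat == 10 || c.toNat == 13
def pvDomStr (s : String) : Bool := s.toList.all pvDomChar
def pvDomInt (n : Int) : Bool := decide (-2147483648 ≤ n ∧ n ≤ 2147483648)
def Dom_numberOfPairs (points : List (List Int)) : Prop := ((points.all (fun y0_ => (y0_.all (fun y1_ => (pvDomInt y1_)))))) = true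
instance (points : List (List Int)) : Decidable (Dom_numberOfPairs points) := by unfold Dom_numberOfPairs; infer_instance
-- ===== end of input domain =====

-- B replaces A's running-max single pass by a per-pair repeated scan for a blocking
-- point (alternative algorithm, not faster); both sort the argument in place identically.


-- ===== PORT A =====
-- float("-inf") is ported as `none : Option Int`; pvLtOpt is `ma < y2` with ma possibly -inf,
-- so the chained comparison `ma < y2 <= y1` becomes the conjunction below.
def pvLtOpt (ma : Option Int) (v : Int) : Bool :=
  match ma with | none => true | some m => decide (m < v)
def numberOfPairs (points : List (List Int)) : Int :=
  let pts := PySem.List.sorted2 points (fun x => PySem.List.pyGetD x 0 0) (fun x => -(PySem.List.pyGetD x 1 0))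
  let L := PySem.List.len pts
  (PySem.List.pyRange 0 L 1).foldl (fun ret i =>
    let y1 := PySem.List.pyGetD (PySem.List.pyGetD pts i ([] : List Int)) 1 0
    ((PySem.List.pyRange (i + 1) L 1).foldl (fun (st : Int × Option Int) j =>
      let y2 := PySem.List.pyGetD (PySem.List.pyGetD pts j ([] : List Int)) 1 0
      if (pvLtOpt st.2 y2 && decide (y2 ≤ y1))
      then (st.1 + 1, some y2) else st) (ret, (none : Option Int))).1) 0

-- ===== PORT B =====
def numberOfPairs_alt (points : List (List Int)) : Int :=
  let pts := PySem.List.sorted2 points (fun x => PySem.List.pyGetD x 0 0) (fun x => -(PySem.List.pyGetD x 1 0))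
  let n := PySem.List.len pts
  (PySem.List.pyRange 0 n 1).foldl (fun count i =>
    (PySem.List.pyRange (i + 1) n 1).foldl (fun count j =>
      if (decide (PySem.List.pyGetD (PySem.List.pyGetD pts j ([] : List Int)) 1 0 ≤
                  PySem.List.pyGetD (PySem.List.pyGetD pts i ([] : List Int)) 1 0)
          && (PySem.List.pyRange (i + 1) j 1).all (fun k =>
               !(decide (PySem.List.pyGetD (PySem.List.pyGetD pts j ([] : List Int)) 1 0 ≤
                         PySem.List.pyGetD (PySem.List.pyGetD pts k ([] : List Int)) 1 0)
                 && decide (PySem.List.pyGetD (PySem.List.pyGetD pts k ([] : List Int)) 1 0 ≤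
                            PySem.List.pyGetD (PySem.List.pyGetD pts i ([] : List Int)) 1 0))))
      then count + 1 else count) count) 0

-- ===== PRECONDITION & SPEC =====
-- Pre_ excludes exactly the inputs where Python A raises (IndexError in the sort key
-- or in points[i][1] when some point has fewer than two coordinates).
def Pre_numberOfPairs (points : List (List Int)) : Prop := ∀ p ∈ points, 2 ≤ p.length
instance (points : List (List Int)) : Decidable (Pre_numberOfPairs points) := by unfold Pre_numberOfPairs; infer_instance
def pvWitness_numberOfPairs : List (List Int) := [[1, 2], [0, 3], [2, 1]]
def Spec_numberOfPairs (points : List (List Int)) (out : Int) : Prop := out = numberOfPairs_alt points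
instance (points : List (List Int)) (out : Int) : Decidable (Spec_numberOfPairs points out) := by unfold Spec_numberOfPairs; infer_instance

-- ===== CLAIM (what is proved, stated in full; the proofs are below) =====
def Claim_equal_numberOfPairs : Prop := ∀ (points : List (List Int)), Dom_numberOfPairs points → Pre_numberOfPairs points → Spec_numberOfPairs points (numberOfPairs points)

-- ===== LEMMAS AND PROOFS =====

-- Invariant carried by A's running max while scanning indices lo..a-1 (y k = y-value at index k):
-- none ↔ no scanned value is ≤ y1; some m ↔ m is the greatest scanned value that is ≤ y1.
def pvMaInv (y : Int → Int) (y1 lo a : Int) : Option Int → Prop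
  | none => ∀ k, lo ≤ k → k < a → ¬(y k ≤ y1)
  | some m => m ≤ y1 ∧ (∃ k, lo ≤ k ∧ k < a ∧ y k = m) ∧ ∀ k, lo ≤ k → k < a → y k ≤ y1 → y k ≤ m

-- A's inner running-max loop equals B's inner counted-scan loop, given the invariant.
theorem pv_inner_eq (y : Int → Int) (y1 L lo : Int) :
    ∀ (n : Nat) (a c : Int) (ma : Option Int), (L - a).toNat = n → lo ≤ a → pvMaInv y y1 lo a ma →
    ((PySem.List.pyRange a L 1).foldl (fun (st : Int × Option Int) j =>
        if (pvLtOpt st.2 (y j) && decide (y j ≤ y1))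
        then (st.1 + 1, some (y j)) else st) (c, ma)).1
      = (PySem.List.pyRange a L 1).foldl (fun c j =>
          if (decide (y j ≤ y1) && (PySem.List.pyRange lo j 1).all (fun k =>
                !(decide (y j ≤ y k) && decide (y k ≤ y1))))
          then c + 1 else c) c := by
  intro n
  induction n with
  | zero =>
    intro a c ma hn _ _
    rw [PySem.List.pyRange_one_eq_nil (by omega)]
    rfl
  | succ n ih =>
    intro a c ma hn hlo hinv
    rw [PySem.List.pyRange_one_cons (by omega)]
    simp only [List.foldl_cons]
    have hB : ((decide (y a ≤ y1) && (PySem.List.pyRange lo a 1).all (fun k =>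
            !(decide (y a ≤ y k) && decide (y k ≤ y1)))) = true)
        ↔ (y a ≤ y1 ∧ ∀ k, lo ≤ k ∧ k < a → (y k < y a ∨ y1 < y k)) := by
      simp only [Bool.and_eq_true, decide_eq_true_eq, List.all_eq_true,
        PySem.List.mem_pyRange_one, Bool.not_eq_true', Bool.and_eq_false_iff,
        decide_eq_false_iff_not, not_le]
    have hcond :
        (pvLtOpt ma (y a) && decide (y a ≤ y1))
        = (decide (y a ≤ y1) && (PySem.List.pyRange lo a 1).all (fun k =>
            !(decide (y a ≤ y k) && decide (y k ≤ y1)))) := by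
      rw [Bool.eq_iff_iff, hB]
      cases ma with
      | none =>
        simp only [pvMaInv] at hinv
        simp only [pvLtOpt, Bool.true_and, decide_eq_true_eq]
        constructor
        · intro h1
          refine ⟨h1, fun k hk => ?_⟩
          have := hinv k hk.1 hk.2
          exact Or.inr (by omega)
        · exact fun h => h.1
      | some m =>
        obtain ⟨hm1, ⟨kw, hkw1, hkw2, hkw3⟩, hmax⟩ := hinv
        simp only [pvLtOpt, Bool.and_eq_true, decide_eq_true_eq]
        constructor
        · rintro ⟨h2, h1⟩
          refine ⟨h1, fun k hk => ?_⟩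
          by_cases h3 : y k ≤ y1
          · have := hmax k hk.1 hk.2 h3
            exact Or.inl (by omega)
          · exact Or.inr (by omega)
        · rintro ⟨h1, hall⟩
          refine ⟨?_, h1⟩
          have := hall kw ⟨hkw1, hkw2⟩
          omega
    rw [hcond]
    by_cases hc : (decide (y a ≤ y1) && (PySem.List.pyRange lo a 1).all (fun k =>
        !(decide (y a ≤ y k) && decide (y k ≤ y1)))) = true
    · simp only [hc, if_true]
      apply ih (a + 1) (c + 1) (some (y a)) (by omega) (by omega)
      rw [hB] at hc
      obtain ⟨h1, h2⟩ := hc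
      refine ⟨h1, ⟨a, by omega, by omega, rfl⟩, ?_⟩
      intro k hk1 hk2 hk3
      by_cases hka : k < a
      · have := h2 k ⟨hk1, hka⟩
        omega
      · have hke : k = a := by omega
        subst hke
        omega
    · simp only [hc]
      apply ih (a + 1) c ma (by omega) (by omega)
      rw [hB] at hc
      push Not at hc
      cases ma with
      | none =>
        simp only [pvMaInv] at hinv ⊢
        intro k hk1 hk2
        by_cases hka : k < a
        · exact hinv k hk1 hka
        · have hke : k = a := by omega
          subst hke
          intro hcon
          obtain ⟨k', hk'w, hk'1, hk'2⟩ := hc hcon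
          exact hinv k' hk'w.1 hk'w.2 hk'2
      | some m =>
        obtain ⟨hm1, ⟨kw, hkw1, hkw2, hkw3⟩, hmax⟩ := hinv
        refine ⟨hm1, ⟨kw, hkw1, by omega, hkw3⟩, ?_⟩
        intro k hk1 hk2 hk3
        by_cases hka : k < a
        · exact hmax k hk1 hka hk3
        · have hke : k = a := by omega
          subst hke
          obtain ⟨k', hk'w, hk'1, hk'2⟩ := hc hk3
          have := hmax k' hk'w.1 hk'w.2 hk'2
          omega

theorem pv_eq (points : List (List Int)) : numberOfPairs points = numberOfPairs_alt points := by
  unfold numberOfPairs numberOfPairs_alt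
  simp only []
  congr 1
  funext ret i
  exact pv_inner_eq
    (fun j => PySem.List.pyGetD (PySem.List.pyGetD
      (PySem.List.sorted2 points (fun x => PySem.List.pyGetD x 0 0) (fun x => -(PySem.List.pyGetD x 1 0)))
      j ([] : List Int)) 1 0)
    (PySem.List.pyGetD (PySem.List.pyGetD
      (PySem.List.sorted2 points (fun x => PySem.List.pyGetD x 0 0) (fun x => -(PySem.List.pyGetD x 1 0)))
      i ([] : List Int)) 1 0)
    (PySem.List.len (PySem.List.sorted2 points (fun x => PySem.List.pyGetD x 0 0) (fun x => -(PySem.List.pyGetD x 1 0))))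
    (i + 1)
    _ (i + 1) ret none rfl (by omega) (by intro k h1 h2; omega)

-- ===== VERDICT (by name: the statement is the Claim_ definition above) =====
theorem numberOfPairs_spec : Claim_equal_numberOfPairs := by
  intro points _ _
  unfold Spec_numberOfPairs
  exact pv_eq points
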